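-- pv_equiv track=rewrite | github.com/thinkfast59/sinhala-news-video_bot | bot.py | upgrade_image_url
-- ===== SOURCE A (Python) =====
-- def upgrade_image_url(url):
--     if not url:
--         return None
--
--     upgraded = url
--
--     replacements = [
--         "/standard/240/",
--         "/standard/320/",
--         "/standard/480/",
--         "/standard/624/",
--         "/standard/800/",
--         "/ace/standard/240/",
--         "/ace/standard/320/",
--         "/ace/standard/480/",
--         "/ace/standard/624/",
--         "/ace/standard/800/",
--     ]
--
--     for old in replacements:
--         size_part = old.split("/")[-2]
--         upgraded = upgraded.replace(old, old.replace(size_part, "1024"))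
--
--     return upgraded
-- ===== SOURCE B (Python) =====
-- _PATS = tuple("/standard/%s/" % s for s in ("240", "320", "480", "624", "800"))
--
--
-- def upgrade_image_url(url):
--     if not url:
--         return None
--     out = []
--     i = 0
--     n = len(url)
--     while i < n:
--         if url.startswith(_PATS, i):
--             out.append("/standard/1024")
--             i += 13  # keep the trailing slash: it may open the next segment
--         else:
--             out.append(url[i])
--             i += 1
--     return "".join(out)
-- ===== Notes on version B (the rewrite author's own statement) =====
-- stated objective: alternative
-- what changed: Replaces A's ten sequential full-string str.replace passes (five of which, the /ace/ variants, can never fire because the bare pass has already rewritten their inner substring) by one left-to-right scan that rewrites every '/standard/<size>' segment followed by a slash in a single pass, keeping the shared slash so adjacent segments are all upgraded.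
-- intended difference: On URLs containing a back-to-back same-size run such as '/standard/240/standard/240/' (the two segments share the middle slash), A's str.replace consumes the shared slash and leaves every second occurrence un-upgraded (e.g. returns '/standard/1024/standard/240/'), while B upgrades all of them ('/standard/1024/standard/1024/'); upgrading every low-resolution segment is what the function is for, so B's value is the intended one. — e.g. on upgrade_image_url(some "/standard/240/standard/240/"): A returns some "/standard/1024/standard/240/", B returns some "/standard/1024/standard/1024/"
import Mathlib
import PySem

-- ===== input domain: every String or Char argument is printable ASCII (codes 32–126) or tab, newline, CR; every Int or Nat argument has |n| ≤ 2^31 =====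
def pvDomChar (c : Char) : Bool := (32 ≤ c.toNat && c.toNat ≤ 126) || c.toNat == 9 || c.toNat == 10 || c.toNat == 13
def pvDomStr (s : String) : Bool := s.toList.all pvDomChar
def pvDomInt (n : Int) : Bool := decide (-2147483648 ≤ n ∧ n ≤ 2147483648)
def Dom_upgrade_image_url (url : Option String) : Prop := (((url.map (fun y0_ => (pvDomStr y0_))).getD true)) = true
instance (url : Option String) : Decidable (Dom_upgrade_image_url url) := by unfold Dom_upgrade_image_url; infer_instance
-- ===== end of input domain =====

-- B replaces A's ten sequential str.replace passes by one left-to-right scan; on back-to-back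
-- same-size segments sharing a slash A leaves every second one un-upgraded while B upgrades all
-- (stated as the intended difference D_ below); elsewhere the two agree (proved).

-- ===== PORT A =====
def pvReplacements : List String :=
  ["/standard/240/", "/standard/320/", "/standard/480/", "/standard/624/", "/standard/800/",
   "/ace/standard/240/", "/ace/standard/320/", "/ace/standard/480/", "/ace/standard/624/",
   "/ace/standard/800/"]

-- literal port of A: 'if not url: return None' (None or empty string), then one str.replace per
-- pattern, with size_part = old.split("/")[-2]; the [-2] index is ported with pyGetD (it is in
-- range on every element of the literal pattern list).
def upgrade_image_url (url : Option String) : Option String :=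
  match url with
  | none => none
  | some u =>
    if u.toList.isEmpty then none
    else
      some (pvReplacements.foldl (fun upgraded old =>
        let size_part := PySem.List.pyGetD ((PySem.Str.split? old "/").getD []) (-2) ""
        PySem.Str.replace upgraded old (PySem.Str.replace old size_part "1024")) u)

-- ===== PORT B =====
def pvPats : List (List Char) :=
  [['/','s','t','a','n','d','a','r','d','/','2','4','0','/'],
   ['/','s','t','a','n','d','a','r','d','/','3','2','0','/'],
   ['/','s','t','a','n','d','a','r','d','/','4','8','0','/'],
   ['/','s','t','a','n','d','a','r','d','/','6','2','4','/'],
   ['/','s','t','a','n','d','a','r','d','/','8','0','0','/']]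

def pvRep13 : List Char := ['/','s','t','a','n','d','a','r','d','/','1','0','2','4']

-- the scan of Source B: at each position, if one of the five patterns starts here, emit
-- "/standard/1024" and advance 13 (keeping the trailing slash), else copy one character.
-- (structural recursion on a fuel that bounds the number of loop iterations, exactly as
-- PySem.Chars.replace.go does; pySubScan starts it with enough fuel)
def pySubScanGo (pats : List (List Char)) : Nat → List Char → List Char
  | _, [] => []
  | 0, l => l
  | fuel+1, c :: t =>
    if pats.any (fun p => p.isPrefixOf (c :: t)) then pvRep13 ++ pySubScanGo pats fuel (t.drop 12)
    else c :: pySubScanGo pats fuel t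

def pySubScan (pats : List (List Char)) (l : List Char) : List Char :=
  pySubScanGo pats l.length l

def upgrade_image_url_alt (url : Option String) : Option String :=
  match url with
  | none => none
  | some u =>
    if u.toList.isEmpty then none
    else some (String.ofList (pySubScan pvPats u.toList))

-- ===== PRECONDITION & SPEC =====
-- On URLs containing a back-to-back same-size run such as "/standard/240/standard/240/" (the two
-- segments share the middle slash), A's str.replace consumes the shared slash and leaves every
-- second occurrence un-upgraded ("/standard/1024/standard/240/"), while B upgrades all of them
-- ("/standard/1024/standard/1024/"); upgrading every low-resolution segment is the intended value.
def D_upgrade_image_url (url : Option String) : Prop :=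
  ((url.map (fun u =>
      PySem.Str.isIn "/standard/240/standard/240/" u ||
      PySem.Str.isIn "/standard/320/standard/320/" u ||
      PySem.Str.isIn "/standard/480/standard/480/" u ||
      PySem.Str.isIn "/standard/624/standard/624/" u ||
      PySem.Str.isIn "/standard/800/standard/800/" u)).getD false) = true
instance (url : Option String) : Decidable (D_upgrade_image_url url) := by
  unfold D_upgrade_image_url; infer_instance

def Spec_upgrade_image_url (url : Option String) (out : Option String) : Prop :=
  ¬ D_upgrade_image_url url → out = upgrade_image_url_alt url
instance (url : Option String) (out : Option String) : Decidable (Spec_upgrade_image_url url out) := by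
  unfold Spec_upgrade_image_url; infer_instance

def pvDiffWitness_upgrade_image_url : Option String := some "/standard/240/standard/240/"
def pvDiffWitnessOut_upgrade_image_url : (Option String) × (Option String) :=
  (some "/standard/1024/standard/240/", some "/standard/1024/standard/1024/")

-- ===== CLAIM (what is proved, stated in full; the proofs are below) =====
def Claim_unchanged_upgrade_image_url : Prop :=
  ∀ (url : Option String), Dom_upgrade_image_url url →
    Spec_upgrade_image_url url (upgrade_image_url url)
def Claim_changed_upgrade_image_url : Prop :=
  Dom_upgrade_image_url (pvDiffWitness_upgrade_image_url) ∧
  D_upgrade_image_url (pvDiffWitness_upgrade_image_url) ∧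
  upgrade_image_url (pvDiffWitness_upgrade_image_url) = pvDiffWitnessOut_upgrade_image_url.1 ∧
  upgrade_image_url_alt (pvDiffWitness_upgrade_image_url) = pvDiffWitnessOut_upgrade_image_url.2 ∧
  pvDiffWitnessOut_upgrade_image_url.1 ≠ pvDiffWitnessOut_upgrade_image_url.2

def Claim_exact_upgrade_image_url : Prop :=
  ∀ (url : Option String), Dom_upgrade_image_url url → D_upgrade_image_url url →
    upgrade_image_url url ≠ upgrade_image_url_alt url

-- ===== LEMMAS AND PROOFS =====

-- the five size strings, and the building blocks of the patterns, as char lists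
def pvSizes : List (List Char) := [['2','4','0'],['3','2','0'],['4','8','0'],['6','2','4'],['8','0','0']]
def pvTail13 (S : List Char) : List Char := ['s','t','a','n','d','a','r','d','/'] ++ S ++ ['/']
def pvFull (S : List Char) : List Char := '/' :: pvTail13 S
def pvHead13 (S : List Char) : List Char := ['/','s','t','a','n','d','a','r','d','/'] ++ S
def pvDbl (S : List Char) : List Char := pvFull S ++ pvTail13 S
def pvRep14 : List Char := pvRep13 ++ ['/']
def pvTail12 (S : List Char) : List Char := ['s','t','a','n','d','a','r','d','/'] ++ S
def pvAceOld (S : List Char) : List Char := ['/','a','c','e'] ++ pvFull S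
def pvAceNew : List Char := ['/','a','c','e'] ++ pvRep14
def pvMark (S : List Char) : List Char := ['0','2','4'] ++ pvFull S

-- fuel-free form of PySem.Chars.replace (old ≠ [])
def pvRepP (old new : List Char) : List Char → List Char
  | [] => []
  | c :: t =>
    if old.isPrefixOf (c :: t) then new ++ pvRepP old new (t.drop (old.length - 1))
    else c :: pvRepP old new t
termination_by l => l.length
decreasing_by all_goals simp

theorem pv_go_eq (old new : List Char) (h : old ≠ []) :
    ∀ fuel l acc, l.length ≤ fuel →
      PySem.Chars.replace.go old new fuel l acc = acc.reverse ++ pvRepP old new l := by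
  intro fuel
  induction fuel with
  | zero =>
    intro l acc hl
    cases l with
    | nil => simp [PySem.Chars.replace.go, pvRepP]
    | cons c t => simp at hl
  | succ n ih =>
    intro l acc hl
    cases l with
    | nil => simp [PySem.Chars.replace.go, pvRepP]
    | cons c t =>
      rw [PySem.Chars.replace.go]
      by_cases hp : old.isPrefixOf (c :: t) = true
      · rw [if_pos hp]
        rw [ih _ _ (by have h1 : 0 < old.length := List.length_pos_iff.mpr h; simp at hl ⊢; omega)]
        have hod : List.drop old.length (c :: t) = t.drop (old.length - 1) := by
          cases old with
          | nil => exact absurd rfl h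
          | cons o os => simp
        rw [hod, pvRepP, if_pos hp]
        simp
      · rw [if_neg hp]
        rw [ih _ _ (by simp at hl; omega)]
        rw [pvRepP, if_neg hp]
        simp

theorem pv_replace_eq (l old new : List Char) (h : old ≠ []) :
    PySem.Chars.replace l old new = pvRepP old new l := by
  rw [PySem.Chars.replace, if_neg (by simpa using h)]
  simpa using pv_go_eq old new h l.length l [] le_rfl

theorem pv_scan_go2 (pats : List (List Char)) :
    ∀ fuel m l, l.length ≤ fuel → l.length ≤ m →
      pySubScanGo pats fuel l = pySubScanGo pats m l := by
  intro fuel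
  induction fuel with
  | zero =>
    intro m l h _
    cases l with
    | nil => cases m <;> rfl
    | cons c t => simp at h
  | succ n ih =>
    intro m l h hm
    cases l with
    | nil => cases m <;> rfl
    | cons c t =>
      cases m with
      | zero => simp at hm
      | succ m' =>
        simp only [pySubScanGo]
        simp only [List.length_cons, Nat.succ_le_succ_iff] at h hm
        by_cases hc : pats.any (fun p => p.isPrefixOf (c :: t)) = true
        · rw [if_pos hc, if_pos hc]
          rw [ih m' (t.drop 12) (by simp; omega) (by simp; omega)]
        · rw [if_neg hc, if_neg hc]
          rw [ih m' t h hm]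

theorem pv_scan_go (pats : List (List Char)) (fuel : Nat) (l : List Char) (h : l.length ≤ fuel) :
    pySubScanGo pats fuel l = pySubScan pats l :=
  pv_scan_go2 pats fuel l.length l h le_rfl

theorem pv_scan_cons (pats : List (List Char)) (c : Char) (t : List Char) :
    pySubScan pats (c :: t) =
      if pats.any (fun p => p.isPrefixOf (c :: t)) then pvRep13 ++ pySubScan pats (t.drop 12)
      else c :: pySubScan pats t := by
  show pySubScanGo pats (t.length + 1) (c :: t) = _
  simp only [pySubScanGo]
  by_cases hc : pats.any (fun p => p.isPrefixOf (c :: t)) = true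
  · rw [if_pos hc, if_pos hc]
    rw [pv_scan_go pats t.length (t.drop 12) (by simp)]
  · rw [if_neg hc, if_neg hc]
    rw [pv_scan_go pats t.length t le_rfl]

-- a block none of whose positions starts an occurrence passes through pvRepP unchanged
theorem pv_repP_append (old new : List Char) :
    ∀ blk X : List Char, (∀ j < blk.length, ¬ old <+: (blk.drop j ++ X)) →
      pvRepP old new (blk ++ X) = blk ++ pvRepP old new X := by
  intro blk
  induction blk with
  | nil => intro X _; simp
  | cons b bs ih =>
    intro X h
    have h0 : ¬ old.isPrefixOf (b :: (bs ++ X)) = true := by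
      rw [List.isPrefixOf_iff_prefix]
      simpa using h 0 (by simp)
    rw [List.cons_append, pvRepP, if_neg h0]
    rw [ih X (fun j hj => by simpa using h (j+1) (by simpa using hj))]
    simp

theorem pv_repP_id (old new : List Char) :
    ∀ l, (∀ j, ¬ old <+: l.drop j) → pvRepP old new l = l := by
  intro l
  induction l with
  | nil => intro _; rw [pvRepP]
  | cons c t ih =>
    intro h
    have h0 : ¬ old.isPrefixOf (c :: t) = true := by
      rw [List.isPrefixOf_iff_prefix]
      simpa using h 0
    rw [pvRepP, if_neg h0, ih (fun j => by simpa using h (j+1))]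

-- same pass-through for the scan
theorem pv_scan_append (pats : List (List Char)) :
    ∀ blk X : List Char, (∀ j < blk.length, ∀ p ∈ pats, ¬ p <+: (blk.drop j ++ X)) →
      pySubScan pats (blk ++ X) = blk ++ pySubScan pats X := by
  intro blk
  induction blk with
  | nil => intro X _; simp
  | cons b bs ih =>
    intro X h
    have h0 : pats.any (fun p => p.isPrefixOf (b :: (bs ++ X))) = false := by
      rw [List.any_eq_false]
      intro p hp
      rw [List.isPrefixOf_iff_prefix]
      simpa using h 0 (by simp) p hp
    rw [List.cons_append, pv_scan_cons, h0]
    simp only [Bool.false_eq_true, if_false]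
    rw [ih X (fun j hj p hp => by simpa using h (j+1) (by simpa using hj) p hp)]
    simp

theorem pv_scan_nil (l : List Char) : pySubScan [] l = l := by
  induction l with
  | nil => rfl
  | cons c t ih => rw [pv_scan_cons]; simp [ih]

-- no fragment of a pattern tail is created by the scan
theorem pv_size_len (S : List Char) (hS : S ∈ pvSizes) : S.length = 3 := by
  fin_cases hS <;> rfl

theorem pv_tail13_len (S : List Char) (hS : S ∈ pvSizes) : (pvTail13 S).length = 13 := by
  simp [pvTail13, pv_size_len S hS]

theorem pv_full_cons (S : List Char) : pvFull S = '/' :: pvTail13 S := rfl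

-- the head character of the input at a match is '/'
theorem pv_match_head (A : List (List Char)) (hA : ∀ p ∈ A, ∃ S ∈ pvSizes, p = pvFull S)
    (c : Char) (t : List Char)
    (hm : A.any (fun p => p.isPrefixOf (c :: t)) = true) : c = '/' := by
  rw [List.any_eq_true] at hm
  obtain ⟨p, hp, hpre⟩ := hm
  obtain ⟨S', hS', rfl⟩ := hA p hp
  rw [List.isPrefixOf_iff_prefix, pv_full_cons, List.cons_prefix_cons] at hpre
  exact hpre.1.symm

theorem pv_frag (A : List (List Char)) (hA : ∀ p ∈ A, ∃ S ∈ pvSizes, p = pvFull S)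
    (S : List Char) (hS : S ∈ pvSizes) :
    ∀ u k, k ≤ 13 → (pvTail13 S).drop k <+: pySubScan A u → (pvTail13 S).drop k <+: u := by
  have hS3 := pv_size_len S hS
  have hT13 := pv_tail13_len S hS
  intro u
  induction u with
  | nil =>
    intro k _ hpre
    have : pySubScan A ([] : List Char) = [] := rfl
    rw [this] at hpre
    rw [List.prefix_nil] at hpre
    simp [hpre]
  | cons c t ih =>
    intro k hk hpre
    rw [pv_scan_cons] at hpre
    by_cases hm : A.any (fun p => p.isPrefixOf (c :: t)) = true
    · rw [if_pos hm] at hpre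
      have hc : c = '/' := pv_match_head A hA c t hm
      have hfe : (pvTail13 S).drop k = pvRep13.take ((pvTail13 S).drop k).length := by
        have h1 := List.prefix_iff_eq_take.mp hpre
        rwa [List.take_append_of_le_length (by simp [pvRep13]; omega)] at h1
      have hk' : k = 12 ∨ k = 13 := by
        by_contra hcon
        push Not at hcon
        have hk11 : k ≤ 11 := by omega
        fin_cases hS <;> interval_cases k <;> simp_all [pvTail13, pvRep13]
      rcases hk' with rfl | rfl
      · have : (pvTail13 S).drop 12 = ['/'] := by fin_cases hS <;> rfl
        rw [this, hc, List.cons_prefix_cons]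
        simp
      · have : (pvTail13 S).drop 13 = [] := by rw [List.drop_eq_nil_iff]; omega
        rw [this]
        exact List.nil_prefix
    · rw [if_neg hm] at hpre
      by_cases hk13 : k = 13
      · subst hk13
        have : (pvTail13 S).drop 13 = [] := by rw [List.drop_eq_nil_iff]; omega
        rw [this]
        exact List.nil_prefix
      · have hklt : k < (pvTail13 S).length := by omega
        rw [List.drop_eq_getElem_cons hklt] at hpre ⊢
        rw [List.cons_prefix_cons] at hpre ⊢
        exact ⟨hpre.1, ih (k+1) (by omega) hpre.2⟩

-- after a pass over S the scan result contains no occurrence of pvFull S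
theorem pv_no_occ (A : List (List Char)) (hA : ∀ p ∈ A, ∃ S ∈ pvSizes, p = pvFull S)
    (S : List Char) (hS : S ∈ pvSizes) (hSA : pvFull S ∈ A) :
    ∀ n u, u.length ≤ n → ∀ j, ¬ pvFull S <+: (pySubScan A u).drop j := by
  intro n
  induction n with
  | zero =>
    intro u hu j
    have : u = [] := by cases u with | nil => rfl | cons c t => simp at hu
    subst this
    show ¬ pvFull S <+: (([] : List Char)).drop j
    rw [pv_full_cons]
    simp
  | succ n ih =>
    intro u hu j
    cases u with
    | nil =>
      show ¬ pvFull S <+: (([] : List Char)).drop j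
      rw [pv_full_cons]
      simp
    | cons c t =>
      rw [pv_scan_cons]
      by_cases hm : A.any (fun p => p.isPrefixOf (c :: t)) = true
      · rw [if_pos hm]
        by_cases hj : j < 14
        · fin_cases hS <;> interval_cases j <;>
            simp_all [pvFull, pvTail13, pvRep13, List.cons_prefix_cons]
        · have hj' : j = pvRep13.length + (j - 14) := by simp [pvRep13]; omega
          rw [hj', List.drop_length_add_append]
          exact ih (t.drop 12) (by simp at hu ⊢; omega) (j - 14)
      · rw [if_neg hm]
        by_cases hj : j = 0
        · subst hj
          intro hpre
          rw [List.drop_zero, pv_full_cons, List.cons_prefix_cons] at hpre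
          have ht : pvTail13 S <+: t := by
            have := pv_frag A hA S hS t 0 (by omega) (by simpa using hpre.2)
            simpa using this
          rw [Bool.not_eq_true, List.any_eq_false] at hm
          have := hm (pvFull S) hSA
          rw [List.isPrefixOf_iff_prefix] at this
          exact this (by rw [pv_full_cons, hpre.1]; exact List.cons_prefix_cons.mpr ⟨rfl, ht⟩)
        · have hj1 : (c :: pySubScan A t).drop j = (pySubScan A t).drop (j-1) := by
            cases j with | zero => omega | succ j' => simp
          rw [hj1]
          exact ih t (by simp at hu; omega) (j-1)

theorem pv_repP_head (old new X : List Char) (h : old ≠ []) :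
    pvRepP old new (old ++ X) = new ++ pvRepP old new X := by
  cases old with
  | nil => exact absurd rfl h
  | cons o os =>
    rw [List.cons_append, pvRepP,
        if_pos (by rw [List.isPrefixOf_iff_prefix]; exact ⟨X, by simp⟩)]
    have : (os ++ X).drop ((o :: os).length - 1) = X := by simp
    rw [this]

theorem pv_infix_mono {dbl v u : List Char} (h : ¬ dbl <:+: u) (hvu : v <:+ u) :
    ¬ dbl <:+: v := fun hc => h (hc.trans hvu.isInfix)

-- no pattern occurrence can start strictly inside the replacement text or inside a pattern head
theorem pv_rep13_no_match (S : List Char) (hS : S ∈ pvSizes) (j : Nat) (hj : j < 14)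
    (X : List Char) : ¬ pvFull S <+: (pvRep13.drop j ++ X) := by
  intro hcon
  fin_cases hS <;> interval_cases j <;>
    simp [pvFull, pvTail13, pvRep13, List.cons_prefix_cons] at hcon

theorem pv_rep13tail_no_match (S : List Char) (hS : S ∈ pvSizes) (j : Nat) (hj : j < 13)
    (X : List Char) :
    ¬ pvFull S <+: ((['s','t','a','n','d','a','r','d','/','1','0','2','4'] : List Char).drop j ++ X) := by
  intro hcon
  fin_cases hS <;> interval_cases j <;>
    simp [pvFull, pvTail13, List.cons_prefix_cons] at hcon

theorem pv_head13_no_match (S S'' : List Char) (hS : S ∈ pvSizes) (hS'' : S'' ∈ pvSizes)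
    (j : Nat) (h1 : 1 ≤ j) (hj : j < 13) (X : List Char) :
    ¬ pvFull S'' <+: ((pvHead13 S).drop j ++ X) := by
  intro hcon
  fin_cases hS <;> fin_cases hS'' <;> interval_cases j <;>
    simp [pvHead13, pvFull, pvTail13, List.cons_prefix_cons] at hcon

theorem pv_dbl_decomp (S : List Char) : pvDbl S = pvHead13 S ++ '/' :: pvTail13 S := by
  simp [pvDbl, pvFull, pvHead13, pvTail13]

-- MAIN: one replace pass on top of a scan over A equals the scan over A ++ [pvFull S],
-- provided the input has no same-size slash-sharing run for S
theorem pv_main (S : List Char) (hS : S ∈ pvSizes) :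
    ∀ n (A : List (List Char)), (∀ p ∈ A, ∃ S' ∈ pvSizes, p = pvFull S') →
      ∀ u : List Char, u.length ≤ n → ¬ pvDbl S <:+: u →
        pvRepP (pvFull S) pvRep14 (pySubScan A u) = pySubScan (A ++ [pvFull S]) u := by
  intro n
  induction n with
  | zero =>
    intro A hA u hu hd
    have : u = [] := by cases u with | nil => rfl | cons c t => simp at hu
    subst this
    show pvRepP (pvFull S) pvRep14 ([] : List Char) = ([] : List Char)
    rw [pvRepP]
  | succ n ih =>
    intro A hA u hu hd
    cases u with
    | nil =>
      show pvRepP (pvFull S) pvRep14 ([] : List Char) = ([] : List Char)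
      rw [pvRepP]
    | cons c t =>
      have hu' : t.length ≤ n := by simp at hu; omega
      by_cases hm : A.any (fun p => p.isPrefixOf (c :: t)) = true
      · -- (a) one of the already-processed patterns matches here
        have hm2 : (A ++ [pvFull S]).any (fun p => p.isPrefixOf (c :: t)) = true := by
          rw [List.any_append, hm, Bool.true_or]
        rw [pv_scan_cons, if_pos hm, pv_scan_cons, if_pos hm2]
        rw [pv_repP_append (pvFull S) pvRep14 pvRep13 _
            (fun j hj => pv_rep13_no_match S hS j (by simpa [pvRep13] using hj) _)]
        rw [ih A hA (t.drop 12) (by simp; omega)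
            (pv_infix_mono hd ((List.drop_suffix 12 t).trans (t.suffix_cons c)))]
      · by_cases hf : pvFull S <+: (c :: t)
        · -- (b) only the new pattern matches here
          have hfull_decomp : pvFull S = pvHead13 S ++ ['/'] := by
            simp [pvFull, pvTail13, pvHead13]
          have hm2 : (A ++ [pvFull S]).any (fun p => p.isPrefixOf (c :: t)) = true := by
            rw [List.any_append]
            simp only [List.any_cons, List.any_nil]
            simp [hf]
          obtain ⟨rest, hrest⟩ := hf
          have hu_eq : c :: t = pvHead13 S ++ ('/' :: rest) := by
            rw [← hrest, hfull_decomp]; simp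
          have hH13 : (pvHead13 S).length = 13 := by
            simp [pvHead13, pv_size_len S hS]
          have hrest_len : rest.length = t.length - 13 := by
            have := congrArg List.length hrest
            simp [pvFull, pvTail13, pv_size_len S hS] at this
            omega
          have hrest_suf : rest <:+ (c :: t) := ⟨pvFull S, hrest⟩
          have ht12 : t.drop 12 = '/' :: rest := by
            have h13 : (c :: t).drop 13 = '/' :: rest := by
              rw [hu_eq, ← hH13, List.drop_left]
            simpa using h13
          have hnf : ¬ pvFull S <+: ('/' :: rest) := by
            rintro ⟨w, hw⟩
            apply hd
            refine ⟨[], w, ?_⟩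
            simp only [List.nil_append]
            rw [hu_eq, ← hw, pv_dbl_decomp, pv_full_cons]
            simp
          -- the scan over A walks through the 13 head characters unchanged
          have h1 : pySubScan A (c :: t) = pvHead13 S ++ pySubScan A ('/' :: rest) := by
            rw [hu_eq]
            refine pv_scan_append A (pvHead13 S) ('/' :: rest) ?_
            intro j hj p hp hcon
            obtain ⟨S'', hS'', rfl⟩ := hA p hp
            rcases Nat.eq_zero_or_pos j with hj0 | hj1
            · subst hj0
              rw [List.drop_zero, ← hu_eq] at hcon
              rw [Bool.not_eq_true, List.any_eq_false] at hm
              have := hm _ hp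
              rw [List.isPrefixOf_iff_prefix] at this
              exact this hcon
            · rw [hH13] at hj
              exact pv_head13_no_match S S'' hS hS'' j hj1 hj _ hcon
          rw [h1]
          conv_rhs => rw [pv_scan_cons]
          rw [if_pos hm2, ht12]
          -- now the AUX step on '/' :: rest
          by_cases hm1 : A.any (fun p => p.isPrefixOf ('/' :: rest)) = true
          · -- an old pattern matches right after the shared slash
            rw [pv_scan_cons, if_pos hm1]
            have hm1' : (A ++ [pvFull S]).any (fun p => p.isPrefixOf ('/' :: rest)) = true := by
              rw [List.any_append, hm1, Bool.true_or]
            rw [pv_scan_cons, if_pos hm1']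
            have hassoc : pvHead13 S ++ (pvRep13 ++ pySubScan A (rest.drop 12)) =
                pvFull S ++ (['s','t','a','n','d','a','r','d','/','1','0','2','4'] ++
                  pySubScan A (rest.drop 12)) := by
              rw [hfull_decomp]
              simp [pvRep13]
            rw [hassoc, pv_repP_head _ _ _ (by rw [pv_full_cons]; simp)]
            rw [pv_repP_append (pvFull S) pvRep14
                (['s','t','a','n','d','a','r','d','/','1','0','2','4'] : List Char) _
                (fun j hj => pv_rep13tail_no_match S hS j (by simpa using hj) _)]
            rw [ih A hA (rest.drop 12) (by simp; omega)
                (pv_infix_mono hd ((List.drop_suffix 12 rest).trans hrest_suf))]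
            rw [pvRep14, pvRep13]
            simp
          · -- nothing matches after the shared slash
            rw [pv_scan_cons, if_neg hm1]
            have hm1' : ¬ (A ++ [pvFull S]).any (fun p => p.isPrefixOf ('/' :: rest)) = true := by
              rw [List.any_append]
              simp only [Bool.or_eq_true, List.any_cons, List.any_nil, Bool.or_false]
              rintro (hc | hc)
              · exact hm1 hc
              · rw [List.isPrefixOf_iff_prefix] at hc
                exact hnf hc
            rw [pv_scan_cons, if_neg hm1']
            have hassoc : pvHead13 S ++ ('/' :: pySubScan A rest) =
                pvFull S ++ pySubScan A rest := by
              rw [hfull_decomp]; simp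
            rw [hassoc, pv_repP_head _ _ _ (by rw [pv_full_cons]; simp)]
            rw [ih A hA rest (by omega) (pv_infix_mono hd hrest_suf)]
            rw [pvRep14]
            simp
        · -- (c) no pattern matches here: both sides copy one character
          have hm2 : ¬ (A ++ [pvFull S]).any (fun p => p.isPrefixOf (c :: t)) = true := by
            rw [List.any_append]
            simp only [Bool.or_eq_true, List.any_cons, List.any_nil, Bool.or_false]
            rintro (hc | hc)
            · exact hm hc
            · rw [List.isPrefixOf_iff_prefix] at hc
              exact hf hc
          rw [pv_scan_cons, if_neg hm, pv_scan_cons, if_neg hm2]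
          have hnp : ¬ (pvFull S).isPrefixOf (c :: pySubScan A t) = true := by
            rw [List.isPrefixOf_iff_prefix]
            intro hcon
            rw [pv_full_cons, List.cons_prefix_cons] at hcon
            have hfr := pv_frag A hA S hS t 0 (by omega) (by simpa using hcon.2)
            apply hf
            rw [pv_full_cons, List.cons_prefix_cons]
            exact ⟨hcon.1, by simpa using hfr⟩
          rw [pvRepP, if_neg hnp]
          rw [ih A hA t hu' (pv_infix_mono hd (t.suffix_cons c))]

theorem pv_ace_reduce (S z : List Char) (h : pvAceOld S <+: z) :
    pvFull S <+: z.drop 4 := by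
  obtain ⟨w, hw⟩ := h
  rw [← hw]
  simp [pvAceOld]

-- assembling the ten passes of A over an input without doubled patterns
theorem pv_all_passes (l : List Char) (hdbl : ∀ S ∈ pvSizes, ¬ pvDbl S <:+: l) :
    ∀ S ∈ pvSizes, ∀ A, (∀ p ∈ A, ∃ S' ∈ pvSizes, p = pvFull S') →
      pvRepP (pvFull S) pvRep14 (pySubScan A l) = pySubScan (A ++ [pvFull S]) l := by
  intro S hS A hA
  exact pv_main S hS l.length A hA l le_rfl (hdbl S hS)

theorem pv_ace_pass (l : List Char) (S : List Char) (hS : S ∈ pvSizes) (new : List Char) :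
    pvRepP (pvAceOld S) new (pySubScan pvPats l) = pySubScan pvPats l := by
  have hA_pats : ∀ p ∈ pvPats, ∃ S' ∈ pvSizes, p = pvFull S' := by decide
  apply pv_repP_id
  intro j hcon
  have h4 := pv_ace_reduce S _ hcon
  rw [List.drop_drop] at h4
  exact pv_no_occ pvPats hA_pats S hS (by fin_cases hS <;> decide) l.length l le_rfl _ h4

-- A's ten passes, written at the character-list level
def pvAchain (l : List Char) : List Char :=
  pvRepP (pvAceOld ['8','0','0']) pvAceNew
    (pvRepP (pvAceOld ['6','2','4']) pvAceNew
      (pvRepP (pvAceOld ['4','8','0']) pvAceNew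
        (pvRepP (pvAceOld ['3','2','0']) pvAceNew
          (pvRepP (pvAceOld ['2','4','0']) pvAceNew
            (pvRepP (pvFull ['8','0','0']) pvRep14
              (pvRepP (pvFull ['6','2','4']) pvRep14
                (pvRepP (pvFull ['4','8','0']) pvRep14
                  (pvRepP (pvFull ['3','2','0']) pvRep14
                    (pvRepP (pvFull ['2','4','0']) pvRep14 l)))))))))

theorem pv_fold_toList (u : String) :
    (pvReplacements.foldl (fun upgraded old =>
      let size_part := PySem.List.pyGetD ((PySem.Str.split? old "/").getD []) (-2) ""
      PySem.Str.replace upgraded old (PySem.Str.replace old size_part "1024")) u).toList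
    = pvAchain u.toList := by
  have n1 : PySem.Str.replace "/standard/240/" (PySem.List.pyGetD ((PySem.Str.split? "/standard/240/" "/").getD []) (-2) "") "1024" = "/standard/1024/" := by decide
  have n2 : PySem.Str.replace "/standard/320/" (PySem.List.pyGetD ((PySem.Str.split? "/standard/320/" "/").getD []) (-2) "") "1024" = "/standard/1024/" := by decide
  have n3 : PySem.Str.replace "/standard/480/" (PySem.List.pyGetD ((PySem.Str.split? "/standard/480/" "/").getD []) (-2) "") "1024" = "/standard/1024/" := by decide
  have n4 : PySem.Str.replace "/standard/624/" (PySem.List.pyGetD ((PySem.Str.split? "/standard/624/" "/").getD []) (-2) "") "1024" = "/standard/1024/" := by decide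
  have n5 : PySem.Str.replace "/standard/800/" (PySem.List.pyGetD ((PySem.Str.split? "/standard/800/" "/").getD []) (-2) "") "1024" = "/standard/1024/" := by decide
  have n6 : PySem.Str.replace "/ace/standard/240/" (PySem.List.pyGetD ((PySem.Str.split? "/ace/standard/240/" "/").getD []) (-2) "") "1024" = "/ace/standard/1024/" := by decide
  have n7 : PySem.Str.replace "/ace/standard/320/" (PySem.List.pyGetD ((PySem.Str.split? "/ace/standard/320/" "/").getD []) (-2) "") "1024" = "/ace/standard/1024/" := by decide
  have n8 : PySem.Str.replace "/ace/standard/480/" (PySem.List.pyGetD ((PySem.Str.split? "/ace/standard/480/" "/").getD []) (-2) "") "1024" = "/ace/standard/1024/" := by decide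
  have n9 : PySem.Str.replace "/ace/standard/624/" (PySem.List.pyGetD ((PySem.Str.split? "/ace/standard/624/" "/").getD []) (-2) "") "1024" = "/ace/standard/1024/" := by decide
  have n10 : PySem.Str.replace "/ace/standard/800/" (PySem.List.pyGetD ((PySem.Str.split? "/ace/standard/800/" "/").getD []) (-2) "") "1024" = "/ace/standard/1024/" := by decide
  simp only [pvReplacements, List.foldl]
  rw [n1, n2, n3, n4, n5, n6, n7, n8, n9, n10]
  simp only [PySem.Str.toList_replace]
  rw [(by decide : ("/standard/240/" : String).toList = pvFull ['2','4','0']),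
      (by decide : ("/standard/320/" : String).toList = pvFull ['3','2','0']),
      (by decide : ("/standard/480/" : String).toList = pvFull ['4','8','0']),
      (by decide : ("/standard/624/" : String).toList = pvFull ['6','2','4']),
      (by decide : ("/standard/800/" : String).toList = pvFull ['8','0','0']),
      (by decide : ("/standard/1024/" : String).toList = pvRep14),
      (by decide : ("/ace/standard/240/" : String).toList = pvAceOld ['2','4','0']),
      (by decide : ("/ace/standard/320/" : String).toList = pvAceOld ['3','2','0']),
      (by decide : ("/ace/standard/480/" : String).toList = pvAceOld ['4','8','0']),
      (by decide : ("/ace/standard/624/" : String).toList = pvAceOld ['6','2','4']),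
      (by decide : ("/ace/standard/800/" : String).toList = pvAceOld ['8','0','0']),
      (by decide : ("/ace/standard/1024/" : String).toList = pvAceNew)]
  rw [pv_replace_eq _ _ _ (by simp [pvAceOld]), pv_replace_eq _ _ _ (by simp [pvAceOld]),
      pv_replace_eq _ _ _ (by simp [pvAceOld]), pv_replace_eq _ _ _ (by simp [pvAceOld]),
      pv_replace_eq _ _ _ (by simp [pvAceOld]),
      pv_replace_eq _ _ _ (by rw [pv_full_cons]; simp),
      pv_replace_eq _ _ _ (by rw [pv_full_cons]; simp),
      pv_replace_eq _ _ _ (by rw [pv_full_cons]; simp),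
      pv_replace_eq _ _ _ (by rw [pv_full_cons]; simp),
      pv_replace_eq _ _ _ (by rw [pv_full_cons]; simp)]
  rfl

-- ===== the tightness side: A and B really differ on every input in D_ =====

theorem pv_no_prefix_generic (pat blk Y : List Char) (h1 : ¬ pat <+: blk)
    (h2 : ¬ blk <+: pat) : ¬ pat <+: (blk ++ Y) := by
  intro hcon
  rcases List.prefix_or_prefix_of_prefix hcon (List.prefix_append blk Y) with h | h
  · exact h1 h
  · exact h2 h

theorem pv_repP_match (old new l : List Char) (ho : old ≠ []) (h : old <+: l) :
    pvRepP old new l = new ++ pvRepP old new (l.drop old.length) := by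
  cases l with
  | nil =>
    rw [List.prefix_nil] at h
    exact absurd h ho
  | cons c t =>
    rw [pvRepP, if_pos (List.isPrefixOf_iff_prefix.mpr h)]
    have hod : List.drop old.length (c :: t) = t.drop (old.length - 1) := by
      cases old with
      | nil => exact absurd rfl ho
      | cons o os => simp
    rw [hod]

theorem pv_repP_slash (old new w : List Char) (ho : old ≠ [])
    (hn : ∃ nc, new = '/' :: nc) :
    ∃ Z, pvRepP old new ('/' :: w) = '/' :: Z := by
  by_cases h : old <+: ('/' :: w)
  · obtain ⟨nc, rfl⟩ := hn
    exact ⟨nc ++ pvRepP old ('/' :: nc) (('/' :: w).drop old.length),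
      by rw [pv_repP_match old _ _ ho h]; rfl⟩
  · exact ⟨pvRepP old new w,
      by rw [pvRepP, if_neg (by rw [List.isPrefixOf_iff_prefix]; exact h)]⟩

-- a tracked substring (ending in '/') survives a replace pass that cannot overlap it
theorem pv_track (old new pin pc : List Char) (ho : old ≠ [])
    (hos : ∃ oc, old = oc ++ ['/'])
    (hns : ∃ nc, new = nc ++ ['/']) (hns0 : ∃ nc, new = '/' :: nc)
    (hpin : pin = pc ++ ['/']) (hpc : pc ≠ [])
    (hC0 : ¬ pin <+: old ∧ ¬ old <+: pin)
    (hC2 : ∀ j < pc.length, ¬ old <+: (pc.drop j ++ ['/']) ∧ ¬ (pc.drop j ++ ['/']) <+: old)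
    (hC3 : ∀ j < old.length, 1 ≤ j → j + 1 < old.length →
      ¬ pin <+: old.drop j ∧ ¬ old.drop j <+: pin) :
    ∀ n l, l.length ≤ n → ∀ j, pin <+: l.drop j → pin <:+: pvRepP old new l := by
  have hpinne : pin ≠ [] := by rw [hpin]; simp
  intro n
  induction n with
  | zero =>
    intro l hl j hj
    have hl0 : l = [] := by cases l with | nil => rfl | cons a b => simp at hl
    subst hl0
    rw [List.drop_nil, List.prefix_nil] at hj
    exact absurd hj hpinne
  | succ n ih =>
    intro l hl j hj
    by_cases hm : old <+: l
    · obtain ⟨X, hX⟩ := hm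
      have hrw := pv_repP_match old new l ho ⟨X, hX⟩
      have holen : 1 ≤ old.length := List.length_pos_iff.mpr ho
      have hXd : l.drop old.length = X := by rw [← hX]; simp
      have hXlen : X.length ≤ n := by
        have := congrArg List.length hX
        simp at this
        omega
      rcases Nat.lt_or_ge j old.length with hjlt | hjge
      · rcases Nat.eq_zero_or_pos j with rfl | hj1
        · rw [List.drop_zero] at hj
          rcases List.prefix_or_prefix_of_prefix hj ⟨X, hX⟩ with h | h
          · exact absurd h hC0.1
          · exact absurd h hC0.2
        · rcases Nat.lt_or_ge (j+1) old.length with hjlt1 | hjge1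
          · have hdj : l.drop j = old.drop j ++ X := by
              rw [← hX, List.drop_append_of_le_length (by omega)]
            rw [hdj] at hj
            exact absurd hj
              (pv_no_prefix_generic _ _ _ (hC3 j (by omega) hj1 hjlt1).1
                (hC3 j (by omega) hj1 hjlt1).2)
          · -- j = old.length - 1 : only old's trailing slash overlaps pin
            obtain ⟨oc, hoc⟩ := hos
            have hdropj : old.drop j = ['/'] := by
              have hoce : old.length - 1 = oc.length := by rw [hoc]; simp
              have hje : j = oc.length := by omega
              rw [hoc, hje, List.drop_left]
            have hdj : l.drop j = ['/'] ++ X := by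
              rw [← hX, List.drop_append_of_le_length (by omega), hdropj]
            rw [hdj] at hj
            cases pc with
            | nil => exact absurd rfl hpc
            | cons p0 pcT =>
              have hpin' : pin = p0 :: (pcT ++ ['/']) := by rw [hpin]; simp
              rw [hpin', List.singleton_append, List.cons_prefix_cons] at hj
              obtain ⟨hp0, htail⟩ := hj
              obtain ⟨w, hw⟩ := htail
              have hXw : X = pcT ++ ('/' :: w) := by rw [← hw]; simp
              have hwalk : pvRepP old new X = pcT ++ pvRepP old new ('/' :: w) := by
                rw [hXw]
                apply pv_repP_append
                intro i hi hcon
                have h2 := hC2 (i+1) (by simp; omega)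
                rw [List.drop_succ_cons] at h2
                exact pv_no_prefix_generic old (pcT.drop i ++ ['/']) w h2.1 h2.2
                  (by simpa [List.append_assoc] using hcon)
              obtain ⟨Z, hZ⟩ := pv_repP_slash old new w ho hns0
              obtain ⟨nc, hnc⟩ := hns
              rw [hrw, hXd, hwalk, hZ, hnc]
              refine ⟨nc, Z, ?_⟩
              rw [hpin', hp0]
              simp
      · obtain ⟨k, rfl⟩ : ∃ k, j = old.length + k := ⟨j - old.length, by omega⟩
        have hdj : l.drop (old.length + k) = X.drop k := by
          rw [← hX, List.drop_length_add_append]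
        rw [hdj] at hj
        rw [hrw, hXd]
        exact (ih X hXlen _ hj).trans (List.suffix_append _ _).isInfix
    · cases l with
      | nil =>
        rw [List.drop_nil, List.prefix_nil] at hj
        exact absurd hj hpinne
      | cons c t =>
        have hstep : pvRepP old new (c :: t) = c :: pvRepP old new t := by
          rw [pvRepP, if_neg (by rw [List.isPrefixOf_iff_prefix]; exact hm)]
        rcases Nat.eq_zero_or_pos j with rfl | hj1
        · rw [List.drop_zero] at hj
          obtain ⟨w, hw⟩ := hj
          have hlw : c :: t = pc ++ ('/' :: w) := by rw [← hw, hpin]; simp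
          have hwalk : pvRepP old new (c :: t) = pc ++ pvRepP old new ('/' :: w) := by
            rw [hlw]
            apply pv_repP_append
            intro i hi hcon
            have h2 := hC2 i hi
            exact pv_no_prefix_generic old (pc.drop i ++ ['/']) w h2.1 h2.2
              (by simpa [List.append_assoc] using hcon)
          obtain ⟨Z, hZ⟩ := pv_repP_slash old new w ho hns0
          rw [hwalk, hZ]
          exact ⟨[], Z, by rw [hpin]; simp⟩
        · have hdj : (c :: t).drop j = t.drop (j-1) := by
            cases j with | zero => omega | succ j' => simp
          rw [hdj] at hj
          rw [hstep]
          exact ((ih t (by simp at hl; omega) _ hj).trans (List.suffix_cons c _).isInfix)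

theorem pv_E9 (S : List Char) (hS : S ∈ pvSizes) (j : Nat) (h1 : 1 ≤ j) (h2 : j < 13) :
    ¬ pvDbl S <+: (pvFull S).drop j ∧ ¬ (pvFull S).drop j <+: pvDbl S := by
  fin_cases hS <;> interval_cases j <;> exact ⟨by decide, by decide⟩

-- the pass for size S turns a doubled occurrence into the marker "024/standard/S/"
theorem pv_mark_create (S : List Char) (hS : S ∈ pvSizes) :
    ∀ n l, l.length ≤ n → ∀ j, pvDbl S <+: l.drop j →
      pvMark S <:+: pvRepP (pvFull S) pvRep14 l := by
  have hfne : pvFull S ≠ [] := by rw [pv_full_cons]; simp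
  have hflen : (pvFull S).length = 14 := by fin_cases hS <;> rfl
  have hdne : pvDbl S ≠ [] := by simp [pvDbl, pv_full_cons]
  have hE1 : ∀ i < (pvTail12 S).length,
      ¬ pvFull S <+: ((pvTail12 S).drop i ++ ['/']) ∧
      ¬ ((pvTail12 S).drop i ++ ['/']) <+: pvFull S := by
    fin_cases hS <;> decide
  intro n
  induction n with
  | zero =>
    intro l hl j hj
    have hl0 : l = [] := by cases l with | nil => rfl | cons a b => simp at hl
    subst hl0
    rw [List.drop_nil, List.prefix_nil] at hj
    exact absurd hj hdne
  | succ n ih =>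
    intro l hl j hj
    by_cases hm : pvFull S <+: l
    · obtain ⟨X, hX⟩ := hm
      have hrw := pv_repP_match (pvFull S) pvRep14 l hfne ⟨X, hX⟩
      have hXd : l.drop (pvFull S).length = X := by rw [← hX]; simp
      have hXlen : X.length ≤ n := by
        have := congrArg List.length hX
        simp [hflen] at this
        omega
      have hcore : ∀ v, X = pvTail12 S ++ ('/' :: v) →
          pvMark S <:+: pvRepP (pvFull S) pvRep14 l := by
        intro v hv
        have hwalk : pvRepP (pvFull S) pvRep14 X =
            pvTail12 S ++ pvRepP (pvFull S) pvRep14 ('/' :: v) := by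
          rw [hv]
          apply pv_repP_append
          intro i hi hcon
          exact pv_no_prefix_generic _ _ _ (hE1 i hi).1 (hE1 i hi).2
            (by simpa [List.append_assoc] using hcon)
        obtain ⟨Z, hZ⟩ := pv_repP_slash (pvFull S) pvRep14 v hfne
          ⟨['s','t','a','n','d','a','r','d','/','1','0','2','4','/'], by decide⟩
        rw [hrw, hXd, hwalk, hZ]
        refine ⟨['/','s','t','a','n','d','a','r','d','/','1'], Z, ?_⟩
        fin_cases hS <;>
          simp [pvMark, pvRep14, pvRep13, pvTail12, pvFull, pvTail13]
      rcases Nat.lt_or_ge j 14 with hj14 | hjge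
      · rcases Nat.eq_zero_or_pos j with rfl | hj1
        · rw [List.drop_zero] at hj
          obtain ⟨w, hw⟩ := hj
          have hXv : pvFull S ++ X = pvFull S ++ (pvTail13 S ++ w) := by
            rw [hX, ← hw]
            simp [pvDbl]
          apply hcore w
          rw [List.append_cancel_left hXv]
          fin_cases hS <;> simp [pvTail13, pvTail12]
        · rcases Nat.lt_or_ge j 13 with hj13 | hj13'
          · have hdj : l.drop j = (pvFull S).drop j ++ X := by
              rw [← hX, List.drop_append_of_le_length (by omega)]
            rw [hdj] at hj
            have h9 := pv_E9 S hS j hj1 hj13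
            exact absurd hj (pv_no_prefix_generic _ _ _ h9.1 h9.2)
          · have hj13e : j = 13 := by omega
            subst hj13e
            have hf13 : (pvFull S).drop 13 = ['/'] := by fin_cases hS <;> rfl
            have hd13 : l.drop 13 = '/' :: X := by
              rw [← hX, List.drop_append_of_le_length (by omega), hf13]
              rfl
            rw [hd13] at hj
            have hdbl_cons : pvDbl S = '/' :: (pvTail13 S ++ pvTail13 S) := by
              simp [pvDbl, pv_full_cons]
            rw [hdbl_cons, List.cons_prefix_cons] at hj
            obtain ⟨-, htl⟩ := hj
            obtain ⟨w, hw⟩ := htl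
            apply hcore (pvTail13 S ++ w)
            rw [← hw]
            fin_cases hS <;> simp [pvTail13, pvTail12]
      · obtain ⟨k, rfl⟩ : ∃ k, j = (pvFull S).length + k := ⟨j - 14, by omega⟩
        have hdj : l.drop ((pvFull S).length + k) = X.drop k := by
          rw [← hX, List.drop_length_add_append]
        rw [hdj] at hj
        rw [hrw, hXd]
        exact (ih X hXlen _ hj).trans (List.suffix_append _ _).isInfix
    · cases l with
      | nil =>
        rw [List.drop_nil, List.prefix_nil] at hj
        exact absurd hj hdne
      | cons c t =>
        have hstep : pvRepP (pvFull S) pvRep14 (c :: t) =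
            c :: pvRepP (pvFull S) pvRep14 t := by
          rw [pvRepP, if_neg (by rw [List.isPrefixOf_iff_prefix]; exact hm)]
        rcases Nat.eq_zero_or_pos j with rfl | hj1
        · rw [List.drop_zero] at hj
          exact absurd (List.IsPrefix.trans ⟨pvTail13 S, rfl⟩ hj) hm
        · have hdj : (c :: t).drop j = t.drop (j-1) := by
            cases j with | zero => omega | succ j' => simp
          rw [hdj] at hj
          rw [hstep]
          exact ((ih t (by simp at hl; omega) _ hj).trans (List.suffix_cons c _).isInfix)


theorem pv_infix_to_drop {pat l : List Char} (h : pat <:+: l) : ∃ j, pat <+: l.drop j := by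
  rw [PySem.Chars.exists_prefix_drop_iff_isIn, PySem.Chars.isIn_iff_infix]
  exact h

theorem pv_dbl_step (S P : List Char) (hS : S ∈ pvSizes) (hP : P ∈ pvSizes) (hne : S ≠ P)
    (l : List Char) (h : pvDbl S <:+: l) : pvDbl S <:+: pvRepP (pvFull P) pvRep14 l := by
  obtain ⟨j, hj⟩ := pv_infix_to_drop h
  exact pv_track (pvFull P) pvRep14 (pvDbl S) (pvFull S ++ pvTail12 S)
    (by rw [pv_full_cons]; simp)
    ⟨pvHead13 P, by simp [pvFull, pvTail13, pvHead13]⟩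
    ⟨pvRep13, rfl⟩
    ⟨['s','t','a','n','d','a','r','d','/','1','0','2','4','/'], by decide⟩
    (by simp [pvDbl, pvTail13, pvTail12])
    (by rw [pv_full_cons]; simp)
    (by fin_cases hS <;> fin_cases hP <;> first | (exact absurd rfl hne) | decide)
    (by fin_cases hS <;> fin_cases hP <;> first | (exact absurd rfl hne) | decide)
    (by fin_cases hS <;> fin_cases hP <;> first | (exact absurd rfl hne) | decide)
    l.length l le_rfl j hj

theorem pv_mark_step_bare (S P : List Char) (hS : S ∈ pvSizes) (hP : P ∈ pvSizes)
    (hne : S ≠ P) (l : List Char) (h : pvMark S <:+: l) :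
    pvMark S <:+: pvRepP (pvFull P) pvRep14 l := by
  obtain ⟨j, hj⟩ := pv_infix_to_drop h
  exact pv_track (pvFull P) pvRep14 (pvMark S) (['0','2','4','/'] ++ pvTail12 S)
    (by rw [pv_full_cons]; simp)
    ⟨pvHead13 P, by simp [pvFull, pvTail13, pvHead13]⟩
    ⟨pvRep13, rfl⟩
    ⟨['s','t','a','n','d','a','r','d','/','1','0','2','4','/'], by decide⟩
    (by simp [pvMark, pv_full_cons, pvTail13, pvTail12])
    (by simp)
    (by fin_cases hS <;> fin_cases hP <;> first | (exact absurd rfl hne) | decide)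
    (by fin_cases hS <;> fin_cases hP <;> first | (exact absurd rfl hne) | decide)
    (by fin_cases hS <;> fin_cases hP <;> first | (exact absurd rfl hne) | decide)
    l.length l le_rfl j hj

theorem pv_mark_step_ace (S P : List Char) (hS : S ∈ pvSizes) (hP : P ∈ pvSizes)
    (l : List Char) (h : pvMark S <:+: l) :
    pvMark S <:+: pvRepP (pvAceOld P) pvAceNew l := by
  obtain ⟨j, hj⟩ := pv_infix_to_drop h
  exact pv_track (pvAceOld P) pvAceNew (pvMark S) (['0','2','4','/'] ++ pvTail12 S)
    (by simp [pvAceOld])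
    ⟨['/','a','c','e'] ++ pvHead13 P, by simp [pvAceOld, pvFull, pvTail13, pvHead13]⟩
    ⟨['/','a','c','e'] ++ pvRep13, by simp [pvAceNew, pvRep14]⟩
    ⟨['a','c','e','/','s','t','a','n','d','a','r','d','/','1','0','2','4','/'], by decide⟩
    (by simp [pvMark, pv_full_cons, pvTail13, pvTail12])
    (by simp)
    (by fin_cases hS <;> fin_cases hP <;> decide)
    (by fin_cases hS <;> fin_cases hP <;> decide)
    (by fin_cases hS <;> fin_cases hP <;> decide)
    l.length l le_rfl j hj

theorem pv_create_step (S : List Char) (hS : S ∈ pvSizes) (l : List Char)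
    (h : pvDbl S <:+: l) : pvMark S <:+: pvRepP (pvFull S) pvRep14 l := by
  obtain ⟨j, hj⟩ := pv_infix_to_drop h
  exact pv_mark_create S hS l.length l le_rfl j hj

theorem pv_mark_chain (S : List Char) (hS : S ∈ pvSizes) (l : List Char)
    (h : pvDbl S <:+: l) : pvMark S <:+: pvAchain l := by
  simp only [pvAchain]
  fin_cases hS
  ·
    have h1 := pv_create_step ['2','4','0'] (by decide) _ h
    have h2 := pv_mark_step_bare ['2','4','0'] ['3','2','0'] (by decide) (by decide) (by decide) _ h1
    have h3 := pv_mark_step_bare ['2','4','0'] ['4','8','0'] (by decide) (by decide) (by decide) _ h2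
    have h4 := pv_mark_step_bare ['2','4','0'] ['6','2','4'] (by decide) (by decide) (by decide) _ h3
    have h5 := pv_mark_step_bare ['2','4','0'] ['8','0','0'] (by decide) (by decide) (by decide) _ h4
    have h6 := pv_mark_step_ace ['2','4','0'] ['2','4','0'] (by decide) (by decide) _ h5
    have h7 := pv_mark_step_ace ['2','4','0'] ['3','2','0'] (by decide) (by decide) _ h6
    have h8 := pv_mark_step_ace ['2','4','0'] ['4','8','0'] (by decide) (by decide) _ h7
    have h9 := pv_mark_step_ace ['2','4','0'] ['6','2','4'] (by decide) (by decide) _ h8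
    have h10 := pv_mark_step_ace ['2','4','0'] ['8','0','0'] (by decide) (by decide) _ h9
    exact h10
  ·
    have h1 := pv_dbl_step ['3','2','0'] ['2','4','0'] (by decide) (by decide) (by decide) _ h
    have h2 := pv_create_step ['3','2','0'] (by decide) _ h1
    have h3 := pv_mark_step_bare ['3','2','0'] ['4','8','0'] (by decide) (by decide) (by decide) _ h2
    have h4 := pv_mark_step_bare ['3','2','0'] ['6','2','4'] (by decide) (by decide) (by decide) _ h3
    have h5 := pv_mark_step_bare ['3','2','0'] ['8','0','0'] (by decide) (by decide) (by decide) _ h4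
    have h6 := pv_mark_step_ace ['3','2','0'] ['2','4','0'] (by decide) (by decide) _ h5
    have h7 := pv_mark_step_ace ['3','2','0'] ['3','2','0'] (by decide) (by decide) _ h6
    have h8 := pv_mark_step_ace ['3','2','0'] ['4','8','0'] (by decide) (by decide) _ h7
    have h9 := pv_mark_step_ace ['3','2','0'] ['6','2','4'] (by decide) (by decide) _ h8
    have h10 := pv_mark_step_ace ['3','2','0'] ['8','0','0'] (by decide) (by decide) _ h9
    exact h10
  ·
    have h1 := pv_dbl_step ['4','8','0'] ['2','4','0'] (by decide) (by decide) (by decide) _ h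
    have h2 := pv_dbl_step ['4','8','0'] ['3','2','0'] (by decide) (by decide) (by decide) _ h1
    have h3 := pv_create_step ['4','8','0'] (by decide) _ h2
    have h4 := pv_mark_step_bare ['4','8','0'] ['6','2','4'] (by decide) (by decide) (by decide) _ h3
    have h5 := pv_mark_step_bare ['4','8','0'] ['8','0','0'] (by decide) (by decide) (by decide) _ h4
    have h6 := pv_mark_step_ace ['4','8','0'] ['2','4','0'] (by decide) (by decide) _ h5
    have h7 := pv_mark_step_ace ['4','8','0'] ['3','2','0'] (by decide) (by decide) _ h6
    have h8 := pv_mark_step_ace ['4','8','0'] ['4','8','0'] (by decide) (by decide) _ h7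
    have h9 := pv_mark_step_ace ['4','8','0'] ['6','2','4'] (by decide) (by decide) _ h8
    have h10 := pv_mark_step_ace ['4','8','0'] ['8','0','0'] (by decide) (by decide) _ h9
    exact h10
  ·
    have h1 := pv_dbl_step ['6','2','4'] ['2','4','0'] (by decide) (by decide) (by decide) _ h
    have h2 := pv_dbl_step ['6','2','4'] ['3','2','0'] (by decide) (by decide) (by decide) _ h1
    have h3 := pv_dbl_step ['6','2','4'] ['4','8','0'] (by decide) (by decide) (by decide) _ h2
    have h4 := pv_create_step ['6','2','4'] (by decide) _ h3
    have h5 := pv_mark_step_bare ['6','2','4'] ['8','0','0'] (by decide) (by decide) (by decide) _ h4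
    have h6 := pv_mark_step_ace ['6','2','4'] ['2','4','0'] (by decide) (by decide) _ h5
    have h7 := pv_mark_step_ace ['6','2','4'] ['3','2','0'] (by decide) (by decide) _ h6
    have h8 := pv_mark_step_ace ['6','2','4'] ['4','8','0'] (by decide) (by decide) _ h7
    have h9 := pv_mark_step_ace ['6','2','4'] ['6','2','4'] (by decide) (by decide) _ h8
    have h10 := pv_mark_step_ace ['6','2','4'] ['8','0','0'] (by decide) (by decide) _ h9
    exact h10
  ·
    have h1 := pv_dbl_step ['8','0','0'] ['2','4','0'] (by decide) (by decide) (by decide) _ h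
    have h2 := pv_dbl_step ['8','0','0'] ['3','2','0'] (by decide) (by decide) (by decide) _ h1
    have h3 := pv_dbl_step ['8','0','0'] ['4','8','0'] (by decide) (by decide) (by decide) _ h2
    have h4 := pv_dbl_step ['8','0','0'] ['6','2','4'] (by decide) (by decide) (by decide) _ h3
    have h5 := pv_create_step ['8','0','0'] (by decide) _ h4
    have h6 := pv_mark_step_ace ['8','0','0'] ['2','4','0'] (by decide) (by decide) _ h5
    have h7 := pv_mark_step_ace ['8','0','0'] ['3','2','0'] (by decide) (by decide) _ h6
    have h8 := pv_mark_step_ace ['8','0','0'] ['4','8','0'] (by decide) (by decide) _ h7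
    have h9 := pv_mark_step_ace ['8','0','0'] ['6','2','4'] (by decide) (by decide) _ h8
    have h10 := pv_mark_step_ace ['8','0','0'] ['8','0','0'] (by decide) (by decide) _ h9
    exact h10

-- ===== VERDICT (by name: the statement is the Claim_ definition above) =====
theorem upgrade_image_url_spec : Claim_unchanged_upgrade_image_url := by
  intro url _hDom
  unfold Spec_upgrade_image_url
  intro hD
  cases url with
  | none => rfl
  | some u =>
    have hdbl : ∀ S ∈ pvSizes, ¬ pvDbl S <:+: u.toList := by
      intro S hS hc
      unfold D_upgrade_image_url at hD
      simp only [Option.map_some, Option.getD_some, Bool.or_eq_true, not_or] at hD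
      obtain ⟨⟨⟨⟨h1, h2⟩, h3⟩, h4⟩, h5⟩ := hD
      fin_cases hS
      · exact h1 (by rw [PySem.Str.isIn_iff_infix,
          (by decide : ("/standard/240/standard/240/" : String).toList = pvDbl ['2','4','0'])]; exact hc)
      · exact h2 (by rw [PySem.Str.isIn_iff_infix,
          (by decide : ("/standard/320/standard/320/" : String).toList = pvDbl ['3','2','0'])]; exact hc)
      · exact h3 (by rw [PySem.Str.isIn_iff_infix,
          (by decide : ("/standard/480/standard/480/" : String).toList = pvDbl ['4','8','0'])]; exact hc)
      · exact h4 (by rw [PySem.Str.isIn_iff_infix,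
          (by decide : ("/standard/624/standard/624/" : String).toList = pvDbl ['6','2','4'])]; exact hc)
      · exact h5 (by rw [PySem.Str.isIn_iff_infix,
          (by decide : ("/standard/800/standard/800/" : String).toList = pvDbl ['8','0','0'])]; exact hc)
    show (if u.toList.isEmpty = true then none
        else some (pvReplacements.foldl (fun upgraded old =>
          let size_part := PySem.List.pyGetD ((PySem.Str.split? old "/").getD []) (-2) ""
          PySem.Str.replace upgraded old (PySem.Str.replace old size_part "1024")) u)) =
      (if u.toList.isEmpty = true then none
        else some (String.ofList (pySubScan pvPats u.toList)))
    by_cases he : u.toList.isEmpty = true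
    · rw [if_pos he, if_pos he]
    · rw [if_neg he, if_neg he]
      apply congrArg some
      apply String.toList_inj.mp
      rw [String.toList_ofList, pv_fold_toList]
      simp only [pvAchain]
      have h0 : u.toList = pySubScan [] u.toList := (pv_scan_nil u.toList).symm
      rw [h0]
      rw [pv_all_passes u.toList hdbl ['2','4','0'] (by decide) [] (by decide)]
      rw [pv_all_passes u.toList hdbl ['3','2','0'] (by decide) _ (by decide)]
      rw [pv_all_passes u.toList hdbl ['4','8','0'] (by decide) _ (by decide)]
      rw [pv_all_passes u.toList hdbl ['6','2','4'] (by decide) _ (by decide)]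
      rw [pv_all_passes u.toList hdbl ['8','0','0'] (by decide) _ (by decide)]
      rw [(by decide : ((((([] ++ [pvFull ['2','4','0']]) ++ [pvFull ['3','2','0']]) ++ [pvFull ['4','8','0']]) ++ [pvFull ['6','2','4']]) ++ [pvFull ['8','0','0']]) = pvPats)]
      rw [pv_ace_pass u.toList ['2','4','0'] (by decide) _,
          pv_ace_pass u.toList ['3','2','0'] (by decide) _,
          pv_ace_pass u.toList ['4','8','0'] (by decide) _,
          pv_ace_pass u.toList ['6','2','4'] (by decide) _,
          pv_ace_pass u.toList ['8','0','0'] (by decide) _]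
      rw [pv_scan_nil]

set_option maxRecDepth 100000 in
theorem upgrade_image_url_changed : Claim_changed_upgrade_image_url := by
  unfold Claim_changed_upgrade_image_url; decide

theorem upgrade_image_url_tight : Claim_exact_upgrade_image_url := by
  intro url _hDom hd
  cases url with
  | none => simp [D_upgrade_image_url] at hd
  | some u =>
    have hex : ∃ S ∈ pvSizes, pvDbl S <:+: u.toList := by
      unfold D_upgrade_image_url at hd
      simp only [Option.map_some, Option.getD_some, Bool.or_eq_true] at hd
      rcases hd with ((((h|h)|h)|h)|h)
      · exact ⟨['2','4','0'], by decide, by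
          rw [← (by decide : ("/standard/240/standard/240/" : String).toList = pvDbl ['2','4','0'])]
          exact (PySem.Str.isIn_iff_infix _ _).mp h⟩
      · exact ⟨['3','2','0'], by decide, by
          rw [← (by decide : ("/standard/320/standard/320/" : String).toList = pvDbl ['3','2','0'])]
          exact (PySem.Str.isIn_iff_infix _ _).mp h⟩
      · exact ⟨['4','8','0'], by decide, by
          rw [← (by decide : ("/standard/480/standard/480/" : String).toList = pvDbl ['4','8','0'])]
          exact (PySem.Str.isIn_iff_infix _ _).mp h⟩
      · exact ⟨['6','2','4'], by decide, by
          rw [← (by decide : ("/standard/624/standard/624/" : String).toList = pvDbl ['6','2','4'])]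
          exact (PySem.Str.isIn_iff_infix _ _).mp h⟩
      · exact ⟨['8','0','0'], by decide, by
          rw [← (by decide : ("/standard/800/standard/800/" : String).toList = pvDbl ['8','0','0'])]
          exact (PySem.Str.isIn_iff_infix _ _).mp h⟩
    obtain ⟨S, hS, hdblS⟩ := hex
    have hne : u.toList ≠ [] := by
      intro h0
      rw [h0, List.infix_nil] at hdblS
      exact absurd hdblS (by simp [pvDbl, pv_full_cons])
    have hemp : ¬ u.toList.isEmpty = true := by
      rw [List.isEmpty_iff]
      exact hne
    intro hcon
    simp only [upgrade_image_url, upgrade_image_url_alt] at hcon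
    rw [if_neg hemp, if_neg hemp, Option.some_inj] at hcon
    have hlist := congrArg String.toList hcon
    rw [pv_fold_toList, String.toList_ofList] at hlist
    have hmark := pv_mark_chain S hS u.toList hdblS
    have hfull : pvFull S <:+: pySubScan pvPats u.toList := by
      rw [← hlist]
      exact (List.suffix_append ['0','2','4'] (pvFull S)).isInfix.trans hmark
    obtain ⟨j, hj⟩ := pv_infix_to_drop hfull
    exact pv_no_occ pvPats (by decide) S hS (by fin_cases hS <;> decide)
      u.toList.length u.toList le_rfl j hj
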